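-- pv_equiv track=rewrite | github.com/arsser/PythonUtils | bak/导出钉钉审批记录.py | parse_form_values
-- ===== SOURCE A (Python) =====
-- def parse_form_values(records):
--     all_fields = set()
--     parsed_records = []
--
--     # 解析每个记录的表单值
--     for record in records:
--         form_values = record['form_component_values']
--         parsed_record = {val['name']: val['value'] for val in form_values}
--         parsed_records.append(parsed_record)
--         all_fields.update(parsed_record.keys())
--
--     return all_fields, parsed_records
-- ===== SOURCE B (Python) =====
-- def parse_form_values(records):
--     # flatten everything into one stream of (record_index, name, value) triples,
--     # then scatter the triples into pre-allocated dicts and take the field set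
--     # from the stream's names
--     triples = [(i, val['name'], val['value'])
--                for i, record in enumerate(records)
--                for val in record['form_component_values']]
--     parsed_records = [{} for _ in records]
--     for i, name, value in triples:
--         parsed_records[i][name] = value
--     all_fields = {name for _, name, _ in triples}
--     return all_fields, parsed_records
-- ===== Notes on version B (the rewrite author's own statement) =====
-- stated objective: alternative
-- what changed: Instead of A's fused per-record loop that builds each dict and updates the field set together, B first flattens all form values into one stream of (record_index, name, value) triples, scatters the triples into a pre-allocated list of empty dicts by index, and computes all_fields as the set of the stream's raw names (no per-dict key extraction); Pre_ excludes inputs where a record lacks 'form_component_values' or a form value lacks 'name'/'value' (A raises KeyError there, and so does B).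
import Mathlib
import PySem

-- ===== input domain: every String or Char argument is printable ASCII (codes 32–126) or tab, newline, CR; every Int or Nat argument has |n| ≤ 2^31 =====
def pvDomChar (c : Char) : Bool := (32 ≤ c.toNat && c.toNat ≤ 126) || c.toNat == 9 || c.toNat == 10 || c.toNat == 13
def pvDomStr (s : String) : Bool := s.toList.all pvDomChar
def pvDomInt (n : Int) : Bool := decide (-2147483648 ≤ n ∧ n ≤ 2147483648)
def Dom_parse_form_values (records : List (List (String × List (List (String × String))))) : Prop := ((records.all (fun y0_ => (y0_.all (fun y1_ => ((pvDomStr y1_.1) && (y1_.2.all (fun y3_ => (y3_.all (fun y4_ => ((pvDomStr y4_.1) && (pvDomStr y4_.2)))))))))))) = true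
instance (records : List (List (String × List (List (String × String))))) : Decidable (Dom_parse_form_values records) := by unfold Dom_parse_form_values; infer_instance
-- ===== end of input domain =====

-- B replaces A's fused per-record loop by a different data flow: flatten all form values
-- into one stream of (index, name, value) triples, scatter them into pre-allocated dicts,
-- and take the field set from the raw name stream (objective: alternative decomposition).


-- ===== PORT A =====
-- one fused loop: for each record, look up the form values, build the parsed dict,
-- append its items and update the field set in the same step
def parse_form_values (records : List (List (String × List (List (String × String))))) : List String × (List (List (String × String))) :=
  records.foldl
    (fun (st : List String × List (List (String × String))) record =>
      let form_values := (PySem.Dict.mk record).getD "form_component_values" []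
      let parsed_record :=
        form_values.foldl
          (fun (d : PySem.Dict String String) val =>
            d.insert ((PySem.Dict.mk val).getD "name" "") ((PySem.Dict.mk val).getD "value" ""))
          PySem.Dict.empty
      (PySem.Set.update st.1 parsed_record.keys, st.2 ++ [parsed_record.items]))
    (PySem.Set.empty, [])

-- ===== PORT B =====
-- pass 1: flatten into (index, name, value) triples; pass 2: scatter into a pre-allocated
-- list of empty dicts (indices come from enumerate, hence nonnegative and in range, so
-- '.toNat' + List.modify is exact for the Python item assignment parsed_records[i][name] = value);
-- pass 3: the field set is the set of the stream's names
def parse_form_values_alt (records : List (List (String × List (List (String × String))))) : List String × (List (List (String × String))) :=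
  let triples :=
    (PySem.List.enumerate records).flatMap (fun p =>
      ((PySem.Dict.mk p.2).getD "form_component_values" []).map (fun val =>
        (p.1, (PySem.Dict.mk val).getD "name" "", (PySem.Dict.mk val).getD "value" "")))
  let parsed0 : List (PySem.Dict String String) := records.map (fun _ => PySem.Dict.empty)
  let parsed :=
    triples.foldl (fun ps t => ps.modify t.1.toNat (fun d => d.insert t.2.1 t.2.2)) parsed0
  let all_fields := PySem.Set.ofList (triples.map (fun t => t.2.1))
  (all_fields, parsed.map (fun d => d.items))

-- ===== PRECONDITION & SPEC =====
-- Pre_ excludes exactly the inputs on which A raises KeyError: a record without the key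
-- 'form_component_values', or a form value without 'name' or 'value'.
def Pre_parse_form_values (records : List (List (String × List (List (String × String))))) : Prop :=
  (records.all (fun record =>
    (PySem.Dict.mk record).contains "form_component_values" &&
    ((PySem.Dict.mk record).getD "form_component_values" []).all (fun val =>
      (PySem.Dict.mk val).contains "name" && (PySem.Dict.mk val).contains "value"))) = true
instance (records : List (List (String × List (List (String × String))))) : Decidable (Pre_parse_form_values records) := by unfold Pre_parse_form_values; infer_instance

def pvWitness_parse_form_values : (List (List (String × List (List (String × String))))) :=
  [[("form_component_values", [[("name", "a"), ("value", "1")], [("name", "b"), ("value", "2")]])],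
   [("form_component_values", [])]]

def Spec_parse_form_values (records : List (List (String × List (List (String × String))))) (out : List String × (List (List (String × String)))) : Prop := out = parse_form_values_alt records
instance (records : List (List (String × List (List (String × String))))) (out : List String × (List (List (String × String)))) : Decidable (Spec_parse_form_values records out) := by unfold Spec_parse_form_values; infer_instance

-- ===== CLAIM (what is proved, stated in full; the proofs are below) =====
def Claim_equal_parse_form_values : Prop := ∀ (records : List (List (String × List (List (String × String))))), Dom_parse_form_values records → Pre_parse_form_values records → Spec_parse_form_values records (parse_form_values records)

-- ===== LEMMAS AND PROOFS =====
-- proof-side abbreviations for one record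
def pvFV (record : List (String × List (List (String × String)))) : List (List (String × String)) :=
  (PySem.Dict.mk record).getD "form_component_values" []
def pvName (val : List (String × String)) : String := (PySem.Dict.mk val).getD "name" ""
def pvVal (val : List (String × String)) : String := (PySem.Dict.mk val).getD "value" ""
def pvParsed (record : List (String × List (List (String × String)))) : PySem.Dict String String :=
  (pvFV record).foldl (fun d val => d.insert (pvName val) (pvVal val)) PySem.Dict.empty

-- A's fused fold splits into the list of parsed items and a set-update fold
theorem pv_fold_split (records : List (List (String × List (List (String × String)))))
    (s : List String) (acc : List (List (String × String))) :
    records.foldl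
      (fun (st : List String × List (List (String × String))) record =>
        (PySem.Set.update st.1 (pvParsed record).keys, st.2 ++ [(pvParsed record).items]))
      (s, acc)
    = (records.foldl (fun t r => PySem.Set.update t (pvParsed r).keys) s,
       acc ++ records.map (fun r => (pvParsed r).items)) := by
  induction records generalizing s acc with
  | nil => simp
  | cons r rs ih => simp [ih, List.append_assoc]

-- updating a set with a deduplicated list is updating it with the raw list
theorem pv_update_ofList (xs : List String) (s : PySem.Set String) :
    PySem.Set.update s (PySem.Set.ofList xs) = PySem.Set.update s xs := by
  rw [PySem.Set.update_eq_append_filter, PySem.Set.update_eq_append_filter,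
    PySem.Set.ofList_ofList]

-- A's set fold equals the set of the flattened raw name stream prepended to s
theorem pv_set_flat (records : List (List (String × List (List (String × String)))))
    (s : PySem.Set String) :
    records.foldl (fun t r => PySem.Set.update t (pvParsed r).keys) s
    = PySem.Set.update s (records.flatMap (fun r => (pvFV r).map pvName)) := by
  induction records generalizing s with
  | nil => simp [PySem.Set.update]
  | cons r rs ih =>
      simp only [List.foldl_cons, List.flatMap_cons]
      rw [ih]
      have hk : (pvParsed r).keys = PySem.Set.ofList ((pvFV r).map pvName) := by
        unfold pvParsed
        rw [PySem.Dict.keys_foldl_insert_key]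
        rfl
      rw [hk, pv_update_ofList, PySem.Set.update_append]

-- B's name stream is the flattened raw name stream
theorem pv_triples_names (records : List (List (String × List (List (String × String)))))
    (k : Int) :
    (((PySem.List.enumerate records k).flatMap (fun p =>
        (pvFV p.2).map (fun val => (p.1, pvName val, pvVal val)))).map (fun t => t.2.1))
    = records.flatMap (fun r => (pvFV r).map pvName) := by
  induction records generalizing k with
  | nil => simp [PySem.List.enumerate]
  | cons r rs ih =>
      simp [PySem.List.enumerate_cons, ih, Function.comp]

-- modifying at the length of the prefix hits the head of the suffix
theorem pv_modify_append {α : Type} (done : List α) (x : α) (t : List α) (f : α → α) :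
    (done ++ x :: t).modify done.length f = done ++ f x :: t := by
  induction done with
  | nil => simp [List.modify]
  | cons d ds ih => simpa using ih

-- scattering one record's triples folds its inserts into the dict at its index
theorem pv_scatter_group (fv : List (List (String × String)))
    (done : List (PySem.Dict String String)) (d : PySem.Dict String String)
    (t : List (PySem.Dict String String)) :
    ((fv.map (fun val => ((done.length : Int), pvName val, pvVal val))).foldl
        (fun ps tr => ps.modify tr.1.toNat (fun dd => dd.insert tr.2.1 tr.2.2))
        (done ++ d :: t))
    = done ++ (fv.foldl (fun dd val => dd.insert (pvName val) (pvVal val)) d) :: t := by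
  induction fv generalizing d with
  | nil => simp
  | cons v vs ih =>
      simp only [List.map_cons, List.foldl_cons]
      rw [show ((done.length : Int)).toNat = done.length by simp, pv_modify_append, ih]

-- full scatter: the pre-allocated dicts become the per-record parsed dicts
theorem pv_scatter (records : List (List (String × List (List (String × String)))))
    (done : List (PySem.Dict String String)) :
    (((PySem.List.enumerate records (done.length : Int)).flatMap (fun p =>
        (pvFV p.2).map (fun val => (p.1, pvName val, pvVal val)))).foldl
        (fun ps tr => ps.modify tr.1.toNat (fun dd => dd.insert tr.2.1 tr.2.2))
        (done ++ records.map (fun _ => PySem.Dict.empty)))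
    = done ++ records.map pvParsed := by
  induction records generalizing done with
  | nil => simp [PySem.List.enumerate]
  | cons r rs ih =>
      simp only [PySem.List.enumerate_cons, List.flatMap_cons, List.map_cons, List.foldl_append]
      rw [pv_scatter_group]
      have h1 : (done.length : Int) + 1 = ((done ++ [pvParsed r]).length : Int) := by simp
      have := ih (done ++ [pvParsed r])
      rw [h1]
      simpa [List.append_assoc] using this

-- ===== VERDICT (by name: the statement is the Claim_ definition above) =====
theorem parse_form_values_spec : Claim_equal_parse_form_values := by
  intro records _ _
  show parse_form_values records = parse_form_values_alt records
  have hA : parse_form_values records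
      = (PySem.Set.update PySem.Set.empty (records.flatMap (fun r => (pvFV r).map pvName)),
         records.map (fun r => (pvParsed r).items)) := by
    show (records.foldl
        (fun (st : List String × List (List (String × String))) record =>
          (PySem.Set.update st.1 (pvParsed record).keys, st.2 ++ [(pvParsed record).items]))
        (PySem.Set.empty, [])) = _
    rw [pv_fold_split, pv_set_flat]
    simp
  have hs := pv_scatter records []
  simp only [List.length_nil, Nat.cast_zero, List.nil_append] at hs
  have hB : parse_form_values_alt records
      = (PySem.Set.ofList (records.flatMap (fun r => (pvFV r).map pvName)),
         (records.map pvParsed).map (fun d => d.items)) := by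
    show (PySem.Set.ofList
            (((PySem.List.enumerate records 0).flatMap (fun p =>
              (pvFV p.2).map (fun val => (p.1, pvName val, pvVal val)))).map (fun t => t.2.1)),
          (((PySem.List.enumerate records 0).flatMap (fun p =>
              (pvFV p.2).map (fun val => (p.1, pvName val, pvVal val)))).foldl
            (fun ps tr => ps.modify tr.1.toNat (fun dd => dd.insert tr.2.1 tr.2.2))
            (records.map (fun _ => PySem.Dict.empty))).map (fun d => d.items)) = _
    rw [pv_triples_names, hs]
  rw [hA, hB]
  simp [List.map_map, PySem.Set.update_nil_left, PySem.Set.empty, Function.comp]
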